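-- pv_equiv track=rewrite | github.com/robdragomir/helper_agent | app/infrastructure/online_search.py | _extract_results_from_string
-- ===== SOURCE A (Python) =====
-- from typing import List, Dict
--
-- def _extract_results_from_string(response_str: str) -> List[Dict]:
--     """Extract results from Tavily string response format."""
--     results = []
--     # This is a simple parser; Tavily response format may vary
--     lines = response_str.split("\n")
--     current_result = {}
--
--     for line in lines:
--         if "Title:" in line:
--             if current_result:
--                 results.append(current_result)
--             current_result = {"title": line.split("Title:")[-1].strip()}
--         elif "URL:" in line:
--             current_result["url"] = line.split("URL:")[-1].strip()
--         elif "Content:" in line: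
--             current_result["content"] = line.split("Content:")[-1].strip()
--
--     if current_result:
--         results.append(current_result)
--
--     return results
-- ===== SOURCE B (Python) =====
-- def _extract_results_from_string(response_str: str):
--     """Block-wise parser: partition lines at 'Title:' lines, then parse each block."""
--     lines = response_str.split("\n")
--     k = 0
--     while k < len(lines) and "Title:" not in lines[k]:
--         k += 1
--     leading, rest = lines[:k], lines[k:]
--     blocks = []
--     while rest:
--         j = 1
--         while j < len(rest) and "Title:" not in rest[j]:
--             j += 1
--         blocks.append(rest[:j])
--         rest = rest[j:]
--     results = []
--     lead = _parse_body(leading, {})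
--     if lead:
--         results.append(lead)
--     for b in blocks:
--         results.append(_parse_body(b[1:], {"title": b[0].split("Title:")[-1].strip()}))
--     return results
--
--
-- def _parse_body(body, d):
--     for line in body:
--         if "URL:" in line:
--             d["url"] = line.split("URL:")[-1].strip()
--         elif "Content:" in line:
--             d["content"] = line.split("Content:")[-1].strip()
--     return d
-- ===== Notes on version B (the rewrite author's own statement) =====
-- stated objective: alternative
-- what changed: A is a single streaming loop with a current-dict accumulator flushed at each Title line; B first partitions the lines into a leading block plus Title-headed blocks, then maps an independent block parser over them.
import Mathlib
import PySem

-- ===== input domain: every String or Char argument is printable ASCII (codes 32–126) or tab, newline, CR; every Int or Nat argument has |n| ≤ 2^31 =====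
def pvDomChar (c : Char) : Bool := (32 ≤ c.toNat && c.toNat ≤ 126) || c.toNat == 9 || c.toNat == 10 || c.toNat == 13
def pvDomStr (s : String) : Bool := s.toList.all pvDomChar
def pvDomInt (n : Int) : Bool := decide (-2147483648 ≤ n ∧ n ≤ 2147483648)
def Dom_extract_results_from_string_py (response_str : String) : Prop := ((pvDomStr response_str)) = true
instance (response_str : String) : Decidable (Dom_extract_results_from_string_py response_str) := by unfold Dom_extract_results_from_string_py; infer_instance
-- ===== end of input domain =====

-- B re-decomposes A's single streaming loop as partition-into-blocks-then-map (same cost); return-value equivalence is proved.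

-- shared primitive: line.split(sep)[-1].strip()  (split of a nonempty sep is never empty, so [-1] is getLastD)
def pvLastSplitStrip (line sep : String) : String :=
  PySem.Str.strip (((PySem.Str.split? line sep).getD []).getLastD "")

-- ===== PORT A =====
-- one loop step of A: Title flushes current dict, URL/Content assign into it
def pvStepA (st : List (List (String × String)) × PySem.Dict String String) (line : String) :
    List (List (String × String)) × PySem.Dict String String :=
  if PySem.Str.isIn "Title:" line then
    ((if st.2.items ≠ [] then st.1 ++ [st.2.items] else st.1),
     PySem.Dict.empty.insert "title" (pvLastSplitStrip line "Title:"))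
  else if PySem.Str.isIn "URL:" line then
    (st.1, st.2.insert "url" (pvLastSplitStrip line "URL:"))
  else if PySem.Str.isIn "Content:" line then
    (st.1, st.2.insert "content" (pvLastSplitStrip line "Content:"))
  else st

def extract_results_from_string_py (response_str : String) : List (List (String × String)) :=
  let lines := (PySem.Str.split? response_str "\n").getD []
  let st := lines.foldl pvStepA ([], PySem.Dict.empty)
  if st.2.items ≠ [] then st.1 ++ [st.2.items] else st.1

-- ===== PORT B =====
def pvNotTitle (line : String) : Bool := !(PySem.Str.isIn "Title:" line)

-- B's _parse_body inner step: URL/Content assignment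
def pvBodyStep (d : PySem.Dict String String) (line : String) : PySem.Dict String String :=
  if PySem.Str.isIn "URL:" line then d.insert "url" (pvLastSplitStrip line "URL:")
  else if PySem.Str.isIn "Content:" line then d.insert "content" (pvLastSplitStrip line "Content:")
  else d

def pvParseBody (body : List String) (d : PySem.Dict String String) : PySem.Dict String String :=
  body.foldl pvBodyStep d

-- B's partition loop: each block is a Title line plus the following non-Title lines
def pvBlocksOf : List String → List (List String)
  | [] => []
  | h :: t => (h :: t.takeWhile pvNotTitle) :: pvBlocksOf (t.dropWhile pvNotTitle)
termination_by l => l.length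
decreasing_by simpa using Nat.lt_succ_of_le (t.length_dropWhile_le pvNotTitle)

def pvParseBlock (b : List String) : List (String × String) :=
  match b with
  | [] => []
  | h :: t => (pvParseBody t (PySem.Dict.empty.insert "title" (pvLastSplitStrip h "Title:"))).items

def extract_results_from_string_py_alt (response_str : String) : List (List (String × String)) :=
  let lines := (PySem.Str.split? response_str "\n").getD []
  let leading := lines.takeWhile pvNotTitle
  let rest := lines.dropWhile pvNotTitle
  let lead := pvParseBody leading PySem.Dict.empty
  (if lead.items ≠ [] then [lead.items] else []) ++ (pvBlocksOf rest).map pvParseBlock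

-- ===== PRECONDITION & SPEC =====
def Spec_extract_results_from_string_py (response_str : String) (out : List (List (String × String))) : Prop := out = extract_results_from_string_py_alt response_str
instance (response_str : String) (out : List (List (String × String))) : Decidable (Spec_extract_results_from_string_py response_str out) := by unfold Spec_extract_results_from_string_py; infer_instance

-- ===== CLAIM (what is proved, stated in full; the proofs are below) =====
def Claim_equal_extract_results_from_string_py : Prop := ∀ (response_str : String), Dom_extract_results_from_string_py response_str → Spec_extract_results_from_string_py response_str (extract_results_from_string_py response_str)

-- ===== LEMMAS AND PROOFS =====

lemma items_ne_nil_of_contains (d : PySem.Dict String String) (k : String)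
    (h : d.contains k = true) : d.items ≠ [] := by
  intro he
  rw [PySem.Dict.contains_iff_mem_keys] at h
  simp only [PySem.Dict.keys, he, List.map_nil, List.not_mem_nil] at h

lemma insert_items_ne_nil (d : PySem.Dict String String) (k v : String) :
    (d.insert k v).items ≠ [] :=
  items_ne_nil_of_contains _ k (PySem.Dict.contains_insert_self d k v)

lemma bodyStep_items_ne_nil (d : PySem.Dict String String) (l : String) (h : d.items ≠ []) :
    (pvBodyStep d l).items ≠ [] := by
  unfold pvBodyStep
  split_ifs <;> first | apply insert_items_ne_nil | exact h

lemma parseBody_items_ne_nil (body : List String) (d : PySem.Dict String String)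
    (h : d.items ≠ []) : (pvParseBody body d).items ≠ [] := by
  induction body generalizing d with
  | nil => exact h
  | cons l ls ih => exact ih _ (bodyStep_items_ne_nil d l h)

def pvFlush (st : List (List (String × String)) × PySem.Dict String String) :
    List (List (String × String)) :=
  if st.2.items ≠ [] then st.1 ++ [st.2.items] else st.1

lemma key_lemma (lines : List String) :
    ∀ res cur, pvFlush (lines.foldl pvStepA (res, cur)) =
      res ++ ((if (pvParseBody (lines.takeWhile pvNotTitle) cur).items ≠ []
                then [(pvParseBody (lines.takeWhile pvNotTitle) cur).items] else []) ++
              (pvBlocksOf (lines.dropWhile pvNotTitle)).map pvParseBlock) := by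
  induction lines with
  | nil =>
    intro res cur
    simp only [List.foldl_nil, List.takeWhile_nil, List.dropWhile_nil, pvBlocksOf,
      List.map_nil, List.append_nil, pvParseBody, pvFlush]
    split <;> simp
  | cons l ls ih =>
    intro res cur
    by_cases ht : PySem.Str.isIn "Title:" l = true
    · have hnt : pvNotTitle l = false := by simp only [pvNotTitle, ht, Bool.not_true]
      have hstep : pvStepA (res, cur) l =
          ((if cur.items ≠ [] then res ++ [cur.items] else res),
           PySem.Dict.empty.insert "title" (pvLastSplitStrip l "Title:")) := by
        simp only [pvStepA]; rw [if_pos ht]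
      simp only [List.foldl_cons, List.takeWhile_cons, List.dropWhile_cons, hnt,
        Bool.false_eq_true, if_false, pvBlocksOf, hstep]
      rw [ih]
      have hne : (pvParseBody (ls.takeWhile pvNotTitle)
          (PySem.Dict.empty.insert "title" (pvLastSplitStrip l "Title:"))).items ≠ [] :=
        parseBody_items_ne_nil _ _ (by apply insert_items_ne_nil)
      rw [if_pos hne]
      simp only [List.map_cons, pvParseBlock, pvParseBody]
      by_cases hc : cur.items = [] <;> simp [hc]
    · have ht' : PySem.Str.isIn "Title:" l = false := by
        simpa using ht
      have hnt : pvNotTitle l = true := by simp only [pvNotTitle, ht', Bool.not_false]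
      have hstep : pvStepA (res, cur) l = (res, pvBodyStep cur l) := by
        simp only [pvStepA, pvBodyStep, ht', Bool.false_eq_true, if_false]
        split_ifs <;> rfl
      simp only [List.foldl_cons, List.takeWhile_cons, List.dropWhile_cons, hnt, if_true, hstep]
      rw [ih]
      simp [pvParseBody]

-- ===== VERDICT (by name: the statement is the Claim_ definition above) =====
theorem extract_results_from_string_py_spec : Claim_equal_extract_results_from_string_py := by
  intro s _
  unfold Spec_extract_results_from_string_py extract_results_from_string_py
    extract_results_from_string_py_alt
  have := key_lemma ((PySem.Str.split? s "\n").getD []) [] PySem.Dict.empty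
  simpa [pvFlush] using this
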